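-- pv_equiv track=rewrite | github.com/x1emy/web-dev | lab7/Task1/CodingBat/list2/all.py | sum67
-- ===== SOURCE A (Python) =====
-- def sum67(nums):
--     total, skip = 0, False
--     for num in nums:
--         if num == 6:
--             skip = True
--         elif num == 7 and skip:
--             skip = False
--         elif not skip:
--             total += num
--     return total
-- ===== SOURCE B (Python) =====
-- def sum67(nums):
--     total = 0
--     i = 0
--     n = len(nums)
--     while i < n:
--         if nums[i] == 6:
--             while i < n and nums[i] != 7:
--                 i += 1
--             i += 1  # consume the 7 (safe past end)
--         else:
--             total += nums[i]
--             i += 1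
--     return total
-- ===== Notes on version B (the rewrite author's own statement) =====
-- stated objective: alternative
-- what changed: Replaces A's flag-based state machine (a single pass carrying a 'skip' boolean) with an explicit index loop that, on seeing a 6, runs an inner scan forward past the matching 7 and otherwise adds the element.
import Mathlib
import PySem

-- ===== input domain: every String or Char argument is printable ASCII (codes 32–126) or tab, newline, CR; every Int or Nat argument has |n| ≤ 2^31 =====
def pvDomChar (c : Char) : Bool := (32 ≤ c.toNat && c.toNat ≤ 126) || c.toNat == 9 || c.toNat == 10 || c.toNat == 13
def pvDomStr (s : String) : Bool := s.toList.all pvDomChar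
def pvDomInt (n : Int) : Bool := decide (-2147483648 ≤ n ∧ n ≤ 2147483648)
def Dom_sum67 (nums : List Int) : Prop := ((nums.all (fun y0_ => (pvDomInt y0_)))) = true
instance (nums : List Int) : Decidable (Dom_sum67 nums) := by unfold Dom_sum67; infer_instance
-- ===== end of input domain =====

-- B replaces A's skip-flag state machine with an explicit forward scan past each 6..7 segment (alternative decomposition, same cost).

-- ===== PORT A =====
-- A: one fold carrying (total, skip); the loop body, branches in A's order.
def sum67Step : Int × Bool → Int → Int × Bool :=
  fun st num =>
    if num = 6 then (st.1, true)
    else if num = 7 ∧ st.2 then (st.1, false)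
    else if ¬ st.2 then (st.1 + num, st.2)
    else st

def sum67 (nums : List Int) : Int :=
  (nums.foldl sum67Step (0, false)).1

-- ===== PORT B =====
-- B's inner while loop: advance past elements until (and including) the first 7;
-- the index loop over the list is transcribed as structural recursion on the suffix.
def sum67Skip7 : List Int → List Int
  | [] => []
  | x :: xs => if x = 7 then xs else sum67Skip7 xs

theorem sum67Skip7_length_le : ∀ (xs : List Int), (sum67Skip7 xs).length ≤ xs.length := by
  intro xs
  induction xs with
  | nil => simp [sum67Skip7]
  | cons x xs ih =>
    simp only [sum67Skip7]
    split
    · simp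
    · simp; omega

def sum67_alt : List Int → Int
  | [] => 0
  | x :: xs =>
    if x = 6 then sum67_alt (sum67Skip7 xs)
    else x + sum67_alt xs
termination_by xs => xs.length
decreasing_by
  · exact Nat.lt_succ_of_le (sum67Skip7_length_le xs)
  · simp

-- ===== PRECONDITION & SPEC =====
def Spec_sum67 (nums : List Int) (out : Int) : Prop := out = sum67_alt nums
instance (nums : List Int) (out : Int) : Decidable (Spec_sum67 nums out) := by unfold Spec_sum67; infer_instance

-- ===== CLAIM (what is proved, stated in full; the proofs are below) =====
def Claim_equal_sum67 : Prop := ∀ (nums : List Int), Dom_sum67 nums → Spec_sum67 nums (sum67 nums)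

-- ===== LEMMAS AND PROOFS =====

-- While skipping, A ignores everything up to and including the first 7.
theorem sum67_foldl_true (xs : List Int) (t : Int) :
    (xs.foldl sum67Step (t, true)).1 = ((sum67Skip7 xs).foldl sum67Step (t, false)).1 := by
  induction xs generalizing t with
  | nil => simp [sum67Skip7]
  | cons x xs ih =>
    by_cases h7 : x = 7
    · simp [sum67Skip7, sum67Step, h7]
    · by_cases h6 : x = 6 <;> simp [sum67Skip7, sum67Step, h6, h7, ih]

theorem sum67_foldl_false : ∀ (n : Nat) (xs : List Int), xs.length ≤ n →
    ∀ (t : Int), (xs.foldl sum67Step (t, false)).1 = t + sum67_alt xs := by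
  intro n
  induction n with
  | zero =>
    intro xs h t
    cases xs with
    | nil => simp [sum67_alt]
    | cons x xs => simp at h
  | succ n ih =>
    intro xs h t
    cases xs with
    | nil => simp [sum67_alt]
    | cons x xs =>
      simp only [List.length_cons, Nat.succ_le_succ_iff] at h
      by_cases h6 : x = 6
      · have hlen : (sum67Skip7 xs).length ≤ n :=
          le_trans (sum67Skip7_length_le xs) h
        simp only [sum67_alt, if_pos h6, List.foldl_cons, sum67Step]
        rw [sum67_foldl_true, ih _ hlen t]
      · have h2 : ¬ (x = 7 ∧ False) := by simp
        simp only [List.foldl_cons, sum67Step, if_neg h6]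
        simp only [sum67_alt, if_neg h6]
        rw [if_neg (by simp), if_pos (by simp)]
        rw [ih xs h (t + x)]
        ring

-- ===== VERDICT (by name: the statement is the Claim_ definition above) =====
theorem sum67_spec : Claim_equal_sum67 := by
  intro nums _
  unfold Spec_sum67 sum67
  simpa using sum67_foldl_false nums.length nums (le_refl _) 0
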